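-- pv_equiv track=rewrite | github.com/hast-hash/PBP | BERT_syntax_embedded_3.py | next_bracesclose
-- ===== SOURCE A (Python) =====
-- tokens=[]
--
-- spos=1
--
-- epos=1
--
-- def index_multi(list, x):
--     return [m for m, _x in enumerate(list) if _x == x]
--
-- def next_bracesclose(tokens=tokens, start=spos, end=epos, key='}'):
--     num_bracesclose=index_multi(tokens, key)
--     epos=end
--     for m in num_bracesclose:
--         if start<m:
--             epos=m
--             break
--     return epos
-- ===== SOURCE B (Python) =====
-- def next_bracesclose(tokens=[], start=1, end=1, key='}'):
--     for m, tok in enumerate(tokens):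
--         if m > start and tok == key:
--             return m
--     return end
-- ===== Notes on version B (the rewrite author's own statement) =====
-- stated objective: simpler
-- what changed: Replaces the two-phase build-all-matching-indices-then-scan with a single streaming enumerate pass that early-returns the first qualifying index, maintaining no intermediate list.
import Mathlib
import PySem

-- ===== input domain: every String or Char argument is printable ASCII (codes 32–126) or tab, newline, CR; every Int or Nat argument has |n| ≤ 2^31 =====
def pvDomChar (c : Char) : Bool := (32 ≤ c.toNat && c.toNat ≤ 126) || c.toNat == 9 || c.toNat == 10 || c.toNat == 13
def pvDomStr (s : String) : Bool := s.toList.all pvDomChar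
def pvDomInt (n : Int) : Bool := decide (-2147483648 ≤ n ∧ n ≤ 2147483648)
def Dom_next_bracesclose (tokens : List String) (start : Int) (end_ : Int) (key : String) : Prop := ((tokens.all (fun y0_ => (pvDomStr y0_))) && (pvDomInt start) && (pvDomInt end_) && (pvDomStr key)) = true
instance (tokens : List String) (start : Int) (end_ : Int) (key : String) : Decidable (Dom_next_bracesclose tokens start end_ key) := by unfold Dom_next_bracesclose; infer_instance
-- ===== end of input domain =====

-- B replaces the materialize-all-indices-then-scan of A with one early-exiting enumerate pass (simpler).


-- ===== PORT A =====
-- index_multi(list, x) = [m for m, _x in enumerate(list) if _x == x]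
def index_multi (list_ : List String) (x : String) : List Int :=
  (PySem.List.enumerate list_).filterMap (fun p => if p.2 = x then some p.1 else none)

-- the for-loop of A: epos starts as end, on the first m with start < m set epos = m and break
def pvLoopA (start epos : Int) : List Int → Int
  | [] => epos
  | m :: rest => if start < m then m else pvLoopA start epos rest

def next_bracesclose (tokens : List String) (start : Int) (end_ : Int) (key : String) : Int :=
  pvLoopA start end_ (index_multi tokens key)

-- ===== PORT B =====
-- single streaming pass: first index m > start with tokens[m] == key, else end
def pvScanB (start : Int) (key : String) : List (Int × String) → Option Int
  | [] => none
  | (m, t) :: rest => if start < m ∧ t = key then some m else pvScanB start key rest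

def next_bracesclose_alt (tokens : List String) (start : Int) (end_ : Int) (key : String) : Int :=
  match pvScanB start key (PySem.List.enumerate tokens) with
  | some m => m
  | none => end_

-- ===== PRECONDITION & SPEC =====
def Spec_next_bracesclose (tokens : List String) (start : Int) (end_ : Int) (key : String) (out : Int) : Prop := out = next_bracesclose_alt tokens start end_ key
instance (tokens : List String) (start : Int) (end_ : Int) (key : String) (out : Int) : Decidable (Spec_next_bracesclose tokens start end_ key out) := by unfold Spec_next_bracesclose; infer_instance

-- ===== CLAIM (what is proved, stated in full; the proofs are below) =====
def Claim_equal_next_bracesclose : Prop := ∀ (tokens : List String) (start : Int) (end_ : Int) (key : String), Dom_next_bracesclose tokens start end_ key → Spec_next_bracesclose tokens start end_ key (next_bracesclose tokens start end_ key)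

-- ===== LEMMAS AND PROOFS =====

-- ===== VERDICT (by name: the statement is the Claim_ definition above) =====
theorem pvLoop_scan (start end_ : Int) (key : String) (ps : List (Int × String)) :
    pvLoopA start end_ (ps.filterMap (fun p => if p.2 = key then some p.1 else none)) =
      (match pvScanB start key ps with | some m => m | none => end_) := by
  induction ps with
  | nil => rfl
  | cons p rest ih =>
    obtain ⟨m, t⟩ := p
    by_cases ht : t = key
    · simp [pvScanB, ht, pvLoopA]
      split_ifs with h <;> simp [ih]
    · simp [pvScanB, ht, ih]

theorem next_bracesclose_spec : Claim_equal_next_bracesclose := by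
  intro tokens start end_ key _
  unfold Spec_next_bracesclose next_bracesclose next_bracesclose_alt index_multi
  exact pvLoop_scan start end_ key _
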